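-- pv_equiv track=rewrite | github.com/Moin145/mushh-galaxy-app | api/stream_fetcher.py | prioritize_iframes
-- ===== SOURCE A (Python) =====
-- def prioritize_iframes(iframe_urls, preferred_source):
--     """Prioritize iframe URLs based on source preference"""
--     if preferred_source == 'auto':
--         # Default priority
--         priority_order = ['vidsrc', 'mixdrop', 'streamwish', 'doodstream', 'embed']
--     else:
--         priority_order = [preferred_source, 'vidsrc', 'mixdrop', 'streamwish', 'doodstream', 'embed']
--
--     prioritized = []
--
--     # First, add iframes that match priority order
--     for source in priority_order:
--         for url in iframe_urls:
--             if source in url.lower() and url not in prioritized: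
--                 prioritized.append(url)
--
--     # Then add any remaining iframes
--     for url in iframe_urls:
--         if url not in prioritized:
--             prioritized.append(url)
--
--     return prioritized
-- ===== SOURCE B (Python) =====
-- def prioritize_iframes(iframe_urls, preferred_source):
--     """Prioritize iframe URLs based on source preference"""
--     if preferred_source == 'auto':
--         priority_order = ['vidsrc', 'mixdrop', 'streamwish', 'doodstream', 'embed']
--     else:
--         priority_order = [preferred_source, 'vidsrc', 'mixdrop', 'streamwish', 'doodstream', 'embed']
--
--     k = len(priority_order)
--     buckets = [[] for _ in range(k + 1)]
--     seen = set()
--     for url in iframe_urls: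
--         if url in seen:
--             continue
--         seen.add(url)
--         low = url.lower()
--         rank = next((i for i, s in enumerate(priority_order) if s in low), k)
--         buckets[rank].append(url)
--     return [url for bucket in buckets for url in bucket]
-- ===== Notes on version B (the rewrite author's own statement) =====
-- stated objective: faster
-- what changed: Replaces A's per-source rescans of the url list with list membership tests (O(k*n^2) comparisons) by a single pass over the urls that computes each url's first-matching-source rank once, drops duplicates via a set, appends into per-rank buckets and concatenates them.
import Mathlib
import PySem

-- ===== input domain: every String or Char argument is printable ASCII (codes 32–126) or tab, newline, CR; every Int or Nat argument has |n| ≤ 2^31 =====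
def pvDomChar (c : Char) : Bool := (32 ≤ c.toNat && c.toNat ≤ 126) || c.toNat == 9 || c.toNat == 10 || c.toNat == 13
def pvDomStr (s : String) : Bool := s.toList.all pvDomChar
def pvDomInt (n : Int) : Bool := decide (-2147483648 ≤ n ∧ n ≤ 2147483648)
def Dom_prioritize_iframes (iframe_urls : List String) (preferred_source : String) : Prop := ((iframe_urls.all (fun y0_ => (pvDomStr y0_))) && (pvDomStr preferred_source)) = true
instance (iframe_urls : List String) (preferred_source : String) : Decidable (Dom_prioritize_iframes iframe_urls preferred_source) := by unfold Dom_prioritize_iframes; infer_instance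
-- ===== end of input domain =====

-- B replaces A's per-source rescans of the url list (with a linear `url not in prioritized`
-- check inside) by one pass over the urls that computes each url's first-matching-source
-- rank once, deduplicates with a set, and appends into per-rank buckets (objective: faster).

-- ===== PORT A =====
def prioritize_iframes (iframe_urls : List String) (preferred_source : String) : List String :=
  let priority_order : List String :=
    if preferred_source == "auto" then
      ["vidsrc", "mixdrop", "streamwish", "doodstream", "embed"]
    else
      [preferred_source, "vidsrc", "mixdrop", "streamwish", "doodstream", "embed"]
  -- first nested loop: for source in priority_order: for url in iframe_urls: …
  let prioritized : List String :=
    priority_order.foldl (fun acc source =>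
      iframe_urls.foldl (fun acc url =>
        if PySem.Str.isIn source (PySem.Str.lower url) && !acc.contains url then
          acc ++ [url]
        else acc) acc) []
  -- then: for url in iframe_urls: if url not in prioritized: append
  iframe_urls.foldl (fun acc url =>
    if !acc.contains url then acc ++ [url] else acc) prioritized

-- ===== PORT B =====
-- rank = next((i for i, s in enumerate(priority_order) if s in low), k)
def pvRank (priority_order : List String) (low : String) : Nat :=
  match priority_order.findIdx? (fun s => PySem.Str.isIn s low) with
  | some i => i
  | none => priority_order.length

-- loop body of Source B's single pass
def pvStepB (priority_order : List String)
    (st : List (List String) × PySem.Set String) (url : String) :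
    List (List String) × PySem.Set String :=
  if PySem.Set.contains st.2 url then st
  else
    let low := PySem.Str.lower url
    let rank := pvRank priority_order low
    (st.1.modify rank (fun b => b ++ [url]), PySem.Set.add st.2 url)

def prioritize_iframes_alt (iframe_urls : List String) (preferred_source : String) : List String :=
  let priority_order : List String :=
    if preferred_source == "auto" then
      ["vidsrc", "mixdrop", "streamwish", "doodstream", "embed"]
    else
      [preferred_source, "vidsrc", "mixdrop", "streamwish", "doodstream", "embed"]
  let k := priority_order.length
  let buckets : List (List String) := List.replicate (k + 1) []
  let st := iframe_urls.foldl (pvStepB priority_order) (buckets, PySem.Set.empty)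
  st.1.flatten

-- ===== PRECONDITION & SPEC =====
def Spec_prioritize_iframes (iframe_urls : List String) (preferred_source : String) (out : List String) : Prop := out = prioritize_iframes_alt iframe_urls preferred_source
instance (iframe_urls : List String) (preferred_source : String) (out : List String) : Decidable (Spec_prioritize_iframes iframe_urls preferred_source out) := by unfold Spec_prioritize_iframes; infer_instance

-- ===== CLAIM (what is proved, stated in full; the proofs are below) =====
def Claim_equal_prioritize_iframes : Prop := ∀ (iframe_urls : List String) (preferred_source : String), Dom_prioritize_iframes iframe_urls preferred_source → Spec_prioritize_iframes iframe_urls preferred_source (prioritize_iframes iframe_urls preferred_source)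

-- ===== LEMMAS AND PROOFS =====

-- `source in url.lower()`
def pvMatch (s u : String) : Bool := PySem.Str.isIn s (PySem.Str.lower u)

-- canonical "append first occurrences satisfying p, not yet seen" list
def pvF (p : String → Bool) (seen : List String) : List String → List String
  | [] => []
  | u :: us => if p u && !seen.contains u then u :: pvF p (u :: seen) us else pvF p seen us

-- canonical chunk list for A's outer loop; q = "matched by an earlier source"
def pvChunks (urls : List String) (q : String → Bool) : List String → List String
  | [] => []
  | s :: ss =>
    pvF (fun u => pvMatch s u && !q u) [] urls
      ++ pvChunks urls (fun u => q u || pvMatch s u) ss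

theorem pvF_congr (p q : String → Bool) (l : List String) (s t : List String)
    (h : ∀ u ∈ l, (p u && !s.contains u) = (q u && !t.contains u)) :
    pvF p s l = pvF q t l := by
  induction l generalizing s t with
  | nil => rfl
  | cons u us ih =>
    have hu := h u (List.mem_cons_self)
    simp only [pvF]
    rw [hu]
    split_ifs with hc
    · refine congrArg (u :: ·) (ih (u :: s) (u :: t) ?_)
      intro v hv
      by_cases hvu : v = u
      · subst hvu; simp
      · have hv' := h v (List.mem_cons_of_mem _ hv)
        have hne : (v == u) = false := beq_eq_false_iff_ne.mpr hvu
        simp only [List.contains_cons, hne, Bool.false_or]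
        exact hv'
    · exact ih s t (fun v hv => h v (List.mem_cons_of_mem _ hv))

theorem mem_pvF (p : String → Bool) (l : List String) (seen : List String) (u : String) :
    u ∈ pvF p seen l ↔ u ∈ l ∧ p u = true ∧ seen.contains u = false := by
  induction l generalizing seen with
  | nil => simp [pvF]
  | cons v vs ih =>
    simp only [pvF]
    by_cases hc : (p v && !seen.contains v) = true
    · rw [if_pos hc]
      obtain ⟨hpv, hsv⟩ := Bool.and_eq_true_iff.mp hc
      have hsv' : seen.contains v = false := by simpa using hsv
      simp only [List.mem_cons, ih, List.contains_cons]
      constructor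
      · rintro (rfl | ⟨hm, hp, hs⟩)
        · exact ⟨Or.inl rfl, hpv, hsv'⟩
        · have hs' := Bool.or_eq_false_iff.mp hs
          exact ⟨Or.inr hm, hp, hs'.2⟩
      · rintro ⟨hm, hp, hs⟩
        by_cases huv : u = v
        · exact Or.inl huv
        · rcases hm with rfl | hm
          · exact Or.inl rfl
          · have hne : (u == v) = false := beq_eq_false_iff_ne.mpr huv
            exact Or.inr ⟨hm, hp, by simp only [hne, Bool.false_or]; exact hs⟩
    · rw [if_neg hc]
      rw [ih]
      have hc' : p v = false ∨ seen.contains v = true := by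
        revert hc; cases hp : p v <;> cases hq : seen.contains v <;> simp
      constructor
      · rintro ⟨hm, hp, hs⟩; exact ⟨List.mem_cons_of_mem _ hm, hp, hs⟩
      · rintro ⟨hm, hp, hs⟩
        rcases List.mem_cons.mp hm with rfl | hm'
        · exfalso
          rcases hc' with h' | h'
          · rw [hp] at h'; cases h'
          · rw [hs] at h'; cases h'
        · exact ⟨hm', hp, hs⟩

theorem pv_contains_pvF (p : String → Bool) (l : List String) (seen : List String) (u : String) :
    (pvF p seen l).contains u = (l.contains u && p u && !seen.contains u) := by
  rw [Bool.eq_iff_iff]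
  simp only [List.contains_iff_mem, mem_pvF, Bool.and_eq_true, Bool.not_eq_true']
  tauto

theorem pvFoldl_inner (p : String → Bool) (l acc : List String) :
    l.foldl (fun a u => if p u && !a.contains u then a ++ [u] else a) acc
      = acc ++ pvF p acc l := by
  induction l generalizing acc with
  | nil => simp [pvF]
  | cons u us ih =>
    simp only [List.foldl_cons, pvF]
    by_cases hc : (p u && !acc.contains u) = true
    · rw [if_pos hc, if_pos hc, ih]
      have hF : pvF p (acc ++ [u]) us = pvF p (u :: acc) us := by
        refine pvF_congr p p us _ _ (fun v hv => ?_)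
        cases h1 : (v == u) <;> cases h2 : acc.contains v <;>
          simp [List.contains_append, List.contains_cons, h1, h2, Bool.and_comm]
      rw [hF, List.append_assoc]
      rfl
    · rw [if_neg hc, if_neg hc]
      exact ih acc

theorem pvFoldl_last (l acc : List String) :
    l.foldl (fun a u => if !a.contains u then a ++ [u] else a) acc
      = acc ++ pvF (fun _ => true) acc l := by
  induction l generalizing acc with
  | nil => simp [pvF]
  | cons u us ih =>
    simp only [List.foldl_cons, pvF, Bool.true_and]
    by_cases hc : (!acc.contains u) = true
    · rw [if_pos hc, if_pos hc, ih]
      have hF : pvF (fun _ => true) (acc ++ [u]) us = pvF (fun _ => true) (u :: acc) us := by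
        refine pvF_congr _ _ us _ _ (fun v hv => ?_)
        cases h1 : (v == u) <;> cases h2 : acc.contains v <;>
          simp [List.contains_append, List.contains_cons, h1, h2, Bool.and_comm]
      rw [hF, List.append_assoc]
      rfl
    · rw [if_neg hc, if_neg hc]
      exact ih acc

theorem pvOuterA (urls : List String) (ss : List String) (acc : List String)
    (q : String → Bool) (h : ∀ u ∈ urls, acc.contains u = q u) :
    ss.foldl (fun acc s =>
        urls.foldl (fun a u =>
          if PySem.Str.isIn s (PySem.Str.lower u) && !a.contains u then a ++ [u] else a) acc) acc
      = acc ++ pvChunks urls q ss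
    ∧ ∀ u ∈ urls, (acc ++ pvChunks urls q ss).contains u
        = (q u || ss.any (fun s => pvMatch s u)) := by
  induction ss generalizing acc q with
  | nil =>
    refine ⟨by simp [pvChunks], ?_⟩
    intro u hu
    simp only [pvChunks, List.append_nil, List.any_nil, Bool.or_false]
    exact h u hu
  | cons s ss ih =>
    simp only [List.foldl_cons, pvChunks]
    have h1 := pvFoldl_inner (fun u => PySem.Str.isIn s (PySem.Str.lower u)) urls acc
    have h2 : pvF (fun u => PySem.Str.isIn s (PySem.Str.lower u)) acc urls
        = pvF (fun u => pvMatch s u && !q u) [] urls := by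
      refine pvF_congr _ _ urls _ _ (fun v hv => ?_)
      simp only [pvMatch, h v hv, List.contains_nil, Bool.not_false, Bool.and_true,
        Bool.and_assoc]
    have hstep : ∀ u ∈ urls,
        (acc ++ pvF (fun u => pvMatch s u && !q u) [] urls).contains u
          = (q u || pvMatch s u) := by
      intro u hu
      rw [List.contains_append, pv_contains_pvF, h u hu]
      have hcu : urls.contains u = true := List.contains_iff_mem.mpr hu
      rw [hcu]
      cases hq : q u <;> cases hM : pvMatch s u <;> simp
    obtain ⟨e1, e2⟩ := ih (acc ++ pvF (fun u => pvMatch s u && !q u) [] urls)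
      (fun u => q u || pvMatch s u) hstep
    rw [h1, h2] at *
    constructor
    · rw [e1, List.append_assoc]
    · intro u hu
      have := e2 u hu
      rw [List.append_assoc] at this
      rw [this]
      simp [Bool.or_assoc]

theorem pv_findIdx?_lt (p : String → Bool) (l : List String) (i : Nat)
    (h : l.findIdx? p = some i) : i < l.length := by
  induction l generalizing i with
  | nil => simp at h
  | cons x xs ih =>
    rw [List.findIdx?_cons] at h
    by_cases hp : p x = true
    · rw [if_pos hp] at h
      cases h
      simp
    · rw [if_neg hp] at h
      cases ho : List.findIdx? p xs with
      | none => rw [ho] at h; cases h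
      | some j =>
        rw [ho] at h
        simp only [Option.map_some] at h
        cases h
        have := ih j ho
        simp
        omega

theorem pv_findIdx?_mem (p : String → Bool) (l : List String) (i : Nat)
    (h : l.findIdx? p = some i) : ∃ x ∈ l, p x = true := by
  induction l generalizing i with
  | nil => simp at h
  | cons x xs ih =>
    rw [List.findIdx?_cons] at h
    by_cases hp : p x = true
    · exact ⟨x, List.mem_cons_self, hp⟩
    · rw [if_neg hp] at h
      cases ho : List.findIdx? p xs with
      | none => rw [ho] at h; cases h
      | some j =>
        obtain ⟨y, hy, hpy⟩ := ih j ho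
        exact ⟨y, List.mem_cons_of_mem _ hy, hpy⟩

theorem pv_flatMap_congr (l : List Nat) (f g : Nat → List String)
    (h : ∀ i ∈ l, f i = g i) : l.flatMap f = l.flatMap g := by
  induction l with
  | nil => rfl
  | cons x xs ih =>
    simp only [List.flatMap_cons]
    rw [h x (List.mem_cons_self), ih (fun i hi => h i (List.mem_cons_of_mem _ hi))]

theorem pvChunks_eq (urls : List String) (ss : List String) (q : String → Bool) :
    pvChunks urls q ss
      = (List.range ss.length).flatMap (fun i =>
          pvF (fun u => !q u && (ss.findIdx? (fun s => pvMatch s u) == some i)) [] urls) := by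
  induction ss generalizing q with
  | nil => simp [pvChunks]
  | cons s ss ih =>
    simp only [pvChunks, List.length_cons, List.range_succ_eq_map, List.flatMap_cons,
      List.flatMap_map]
    congr 1
    · refine pvF_congr _ _ urls _ _ (fun v hv => ?_)
      simp only [List.findIdx?_cons]
      by_cases hM : pvMatch s v = true
      · rw [if_pos hM, hM]
        cases hq : q v <;> simp
      · rw [if_neg hM]
        have hM' : pvMatch s v = false := by simpa using hM
        rw [hM']
        cases ho : List.findIdx? (fun s_1 => pvMatch s_1 v) ss <;> simp [ho]
    · rw [ih (fun u => q u || pvMatch s u)]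
      refine pv_flatMap_congr _ _ _ (fun i hi => ?_)
      refine pvF_congr _ _ urls _ _ (fun v hv => ?_)
      simp only [List.findIdx?_cons, List.contains_nil, Bool.not_false, Bool.and_true]
      by_cases hM : pvMatch s v = true
      · rw [if_pos hM, hM]
        simp
      · rw [if_neg hM]
        have hM' : pvMatch s v = false := by simpa using hM
        rw [hM']
        cases ho : List.findIdx? (fun s_1 => pvMatch s_1 v) ss <;>
          simp [ho, Nat.succ_inj]

theorem pvFoldB (order : List String) (l : List String) (bs : List (List String))
    (seen : List String) :
    (l.foldl (pvStepB order) (bs, seen)).1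
      = bs.mapIdx (fun i b =>
          b ++ pvF (fun u => pvRank order (PySem.Str.lower u) == i) seen l) := by
  induction l generalizing bs seen with
  | nil =>
    refine (List.ext_getElem (by simp) ?_).symm
    intro i h1 h2
    rw [List.getElem_mapIdx]
    simp [pvF]
  | cons u us ih =>
    simp only [List.foldl_cons, pvStepB, PySem.Set.contains_eq_listContains]
    by_cases hs : List.contains seen u = true
    · rw [if_pos hs, ih]
      refine List.ext_getElem (by simp) ?_
      intro i h1 h2
      rw [List.getElem_mapIdx, List.getElem_mapIdx]
      have : pvF (fun v => pvRank order (PySem.Str.lower v) == i) seen (u :: us)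
          = pvF (fun v => pvRank order (PySem.Str.lower v) == i) seen us := by
        simp only [pvF, hs, Bool.not_true, Bool.and_false]
        rw [if_neg (by simp)]
      rw [this]
    · rw [if_neg hs]
      have hs' : List.contains seen u = false := by simpa using hs
      have hmem : u ∉ seen := by simpa using hs'
      have hadd : PySem.Set.add seen u = seen ++ [u] := by
        simp [PySem.Set.add, hmem]
      simp only [hadd]
      rw [ih]
      refine List.ext_getElem (by simp) ?_
      intro i h1 h2
      rw [List.getElem_mapIdx, List.getElem_mapIdx]
      rw [List.getElem_modify]
      by_cases hri : pvRank order (PySem.Str.lower u) = i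
      · rw [if_pos hri]
        have hcond : (pvRank order (PySem.Str.lower u) == i) = true := by
          simp [hri]
        have : pvF (fun v => pvRank order (PySem.Str.lower v) == i) seen (u :: us)
            = u :: pvF (fun v => pvRank order (PySem.Str.lower v) == i) (u :: seen) us := by
          simp [pvF, hcond, hs', hmem]
        rw [this]
        have hseen : pvF (fun v => pvRank order (PySem.Str.lower v) == i) (seen ++ [u]) us
            = pvF (fun v => pvRank order (PySem.Str.lower v) == i) (u :: seen) us := by
          refine pvF_congr _ _ us _ _ (fun v hv => ?_)
          cases h1 : (v == u) <;> cases h2 : seen.contains v <;>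
            simp [List.contains_append, List.contains_cons, h1, h2, Bool.and_comm]
        rw [hseen, List.append_assoc]
        rfl
      · rw [if_neg hri]
        have hcond : (pvRank order (PySem.Str.lower u) == i) = false := by
          simp [hri]
        have : pvF (fun v => pvRank order (PySem.Str.lower v) == i) seen (u :: us)
            = pvF (fun v => pvRank order (PySem.Str.lower v) == i) seen us := by
          simp [pvF, hcond, hmem]
        rw [this]
        have hseen : pvF (fun v => pvRank order (PySem.Str.lower v) == i) (seen ++ [u]) us
            = pvF (fun v => pvRank order (PySem.Str.lower v) == i) seen us := by
          refine pvF_congr _ _ us _ _ (fun v hv => ?_)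
          by_cases hvu : v = u
          · subst hvu
            have : (pvRank order (PySem.Str.lower v) == i) = false := hcond
            rw [this]
            simp
          · have hne : (v == u) = false := beq_eq_false_iff_ne.mpr hvu
            simp [List.contains_append, hne, hvu]
        rw [hseen]

theorem pvMapIdx_replicate (n : Nat) (g : Nat → List String) :
    List.mapIdx (fun i (b : List String) => b ++ g i) (List.replicate n ([] : List String))
      = (List.range n).map g := by
  refine List.ext_getElem (by simp) ?_
  intro i h1 h2
  rw [List.getElem_mapIdx, List.getElem_map, List.getElem_replicate, List.getElem_range]
  simp

theorem pvMain (urls : List String) (order : List String) :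
    (urls.foldl (fun acc url => if !acc.contains url then acc ++ [url] else acc)
      (order.foldl (fun acc source =>
        urls.foldl (fun acc url =>
          if PySem.Str.isIn source (PySem.Str.lower url) && !acc.contains url then acc ++ [url]
          else acc) acc) []))
    = (List.mapIdx (fun i (b : List String) =>
          b ++ pvF (fun u => pvRank order (PySem.Str.lower u) == i) [] urls)
        (List.replicate (order.length + 1) [])).flatten := by
  obtain ⟨hA, hinv⟩ := pvOuterA urls order [] (fun _ => false) (by simp)
  simp only [List.nil_append] at hA hinv
  rw [hA, pvFoldl_last]
  rw [pvMapIdx_replicate, ← List.flatMap_def]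
  rw [List.range_succ, List.flatMap_append, List.flatMap_cons, List.flatMap_nil,
    List.append_nil]
  congr 1
  · -- chunks part
    rw [pvChunks_eq urls order (fun _ => false)]
    refine pv_flatMap_congr _ _ _ (fun i hi => ?_)
    have hik : i < order.length := by simpa using List.mem_range.mp hi
    refine pvF_congr _ _ urls _ _ (fun v hv => ?_)
    simp only [Bool.not_false, Bool.true_and]
    congr 1
    unfold pvRank
    simp only [pvMatch]
    cases ho : List.findIdx? (fun s => PySem.Str.isIn s (PySem.Str.lower v)) order with
    | none =>
      have : (order.length == i) = false := beq_eq_false_iff_ne.mpr (by omega)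
      simp [this]
    | some j => simp
  · -- remaining part
    refine pvF_congr _ _ urls _ _ (fun v hv => ?_)
    rw [hinv v hv]
    simp only [Bool.false_or, Bool.true_and, List.contains_nil, Bool.not_false, Bool.and_true]
    have : (pvRank order (PySem.Str.lower v) == order.length)
        = !(order.any fun s => pvMatch s v) := by
      unfold pvRank
      simp only [pvMatch]
      cases ho : List.findIdx? (fun s => PySem.Str.isIn s (PySem.Str.lower v)) order with
      | none =>
        have hall := List.findIdx?_eq_none_iff.mp ho
        have hany : (order.any fun s => PySem.Str.isIn s (PySem.Str.lower v)) = false := by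
          rw [List.any_eq_false]
          intro x hx
          rw [hall x hx]
          simp
        rw [hany]
        simp
      | some j =>
        have hj : j < order.length := pv_findIdx?_lt _ _ _ ho
        have hne : (j == order.length) = false := beq_eq_false_iff_ne.mpr (by omega)
        have hany : (order.any fun s => PySem.Str.isIn s (PySem.Str.lower v)) = true := by
          rw [List.any_eq_true]
          obtain ⟨x, hxm, hxp⟩ := pv_findIdx?_mem _ _ _ ho
          exact ⟨x, hxm, hxp⟩
        rw [hany, hne]
        rfl
    rw [this]

-- ===== VERDICT (by name: the statement is the Claim_ definition above) =====
theorem prioritize_iframes_spec : Claim_equal_prioritize_iframes := by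
  intro urls ps _
  unfold Spec_prioritize_iframes
  simp only [prioritize_iframes, prioritize_iframes_alt]
  rw [pvFoldB]
  exact pvMain urls _
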